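-- pv_equiv track=rewrite | github.com/josephbill/CodilityAssessmentsStudies | 93codility/sanatorium.py | solution
-- ===== SOURCE A (Python) =====
-- def solution(A):
--     # Sort the guest preferences in ascending order.
--     sorted_guests = sorted(A)
--
--     # List to keep track of current occupancy of each room.
--     rooms = []
--
--     for pref in sorted_guests:
--         # track a current room status
--         placed = False
--
--         # Check existing rooms to see if the guest can be accommodated.
--         for i, room in enumerate(rooms):
--             # if the r
--             if len(room) + 1 <= pref:  # Check if adding guest doesn't exceed room's and guest's preference.
--                 rooms[i].append(pref)
--                 placed = True
--                 break
--
--         # If the guest couldn't be accommodated in existing rooms, create a new room.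
--         if not placed:
--             rooms.append([pref])
--
--     return len(rooms)
-- ===== SOURCE B (Python) =====
-- def solution(A):
--     # Room sizes form a nonincreasing array; binary-search the leftmost room
--     # with size < pref instead of scanning all rooms.
--     sizes = []
--     for p in sorted(A):
--         lo, hi = 0, len(sizes)
--         while lo < hi:
--             m = (lo + hi) // 2
--             if sizes[m] < p:
--                 hi = m
--             else:
--                 lo = m + 1
--         if lo < len(sizes):
--             sizes[lo] += 1
--         else:
--             sizes.append(1)
--     return len(sizes)
-- ===== Notes on version B (the rewrite author's own statement) =====
-- stated objective: faster
-- what changed: B keeps only the nonincreasing array of room sizes and binary-searches the leftmost room with size < pref, replacing A's list-of-lists with a linear scan over all rooms per guest.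
import Mathlib
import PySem

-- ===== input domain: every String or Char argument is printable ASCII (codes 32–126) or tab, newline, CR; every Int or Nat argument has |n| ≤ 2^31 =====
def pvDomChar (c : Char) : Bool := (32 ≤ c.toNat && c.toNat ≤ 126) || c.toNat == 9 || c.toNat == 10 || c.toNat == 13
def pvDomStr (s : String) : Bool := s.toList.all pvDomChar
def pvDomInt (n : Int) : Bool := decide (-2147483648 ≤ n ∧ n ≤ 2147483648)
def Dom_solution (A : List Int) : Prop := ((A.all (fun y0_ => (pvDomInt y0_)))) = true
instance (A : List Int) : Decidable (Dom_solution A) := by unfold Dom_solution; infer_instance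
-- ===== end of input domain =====

-- B replaces A's list-of-lists plus per-guest linear room scan by a nonincreasing
-- size array with a binary search for the leftmost room with size < pref (measured faster).

-- ===== PORT A =====
-- inner 'for i, room in enumerate(rooms)' loop: first room with len(room)+1 <= pref
-- gets pref appended (some updated rooms); none = 'not placed'
def placeA : List (List Int) → Int → Option (List (List Int))
  | [], _ => none
  | r :: rs, p =>
      if (r.length : Int) + 1 ≤ p then some ((r ++ [p]) :: rs)
      else (placeA rs p).map (r :: ·)

-- body of the outer 'for pref in sorted_guests' loop
def stepA (rooms : List (List Int)) (p : Int) : List (List Int) :=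
  match placeA rooms p with
  | some rm => rm
  | none => rooms ++ [[p]]

def solution (A : List Int) : Int :=
  (((PySem.List.sorted A (fun x => x) false).foldl stepA []).length : Int)

-- ===== PORT B =====
-- the 'while lo < hi' binary-search loop of Source B
def bsFirstLt (sizes : List Int) (p : Int) (lo hi : Nat) : Nat :=
  if h : lo < hi then
    if sizes.getD ((lo + hi) / 2) 0 < p then bsFirstLt sizes p lo ((lo + hi) / 2)
    else bsFirstLt sizes p ((lo + hi) / 2 + 1) hi
  else lo
termination_by hi - lo
decreasing_by all_goals omega

-- body of Source B's 'for p in sorted(A)' loop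
def stepB (sizes : List Int) (p : Int) : List Int :=
  let lo := bsFirstLt sizes p 0 sizes.length
  if lo < sizes.length then sizes.modify lo (· + 1) else sizes ++ [1]

def solution_alt (A : List Int) : Int :=
  (((PySem.List.sorted A (fun x => x) false).foldl stepB []).length : Int)

-- ===== PRECONDITION & SPEC =====
def Spec_solution (A : List Int) (out : Int) : Prop := out = solution_alt A
instance (A : List Int) (out : Int) : Decidable (Spec_solution A out) := by unfold Spec_solution; infer_instance

-- ===== CLAIM (what is proved, stated in full; the proofs are below) =====
def Claim_equal_solution : Prop := ∀ (A : List Int), Dom_solution A → Spec_solution A (solution A)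

-- ===== LEMMAS AND PROOFS =====

-- sizes array of A's state
def lenMap (rooms : List (List Int)) : List Int := rooms.map (fun r => (r.length : Int))

def firstIdx (sizes : List Int) (p : Int) : Nat := sizes.findIdx (fun x => decide (x < p))

-- the B-step expressed with a linear first-index search (proof-only reference step)
def stepR (sizes : List Int) (p : Int) : List Int :=
  let i := firstIdx sizes p
  if i < sizes.length then sizes.modify i (· + 1) else sizes ++ [1]

def Nonincr (l : List Int) : Prop :=
  ∀ j k (hj : j < l.length) (hk : k < l.length), j ≤ k → l[k] ≤ l[j]

theorem stepA_map (rooms : List (List Int)) (p : Int) :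
    lenMap (stepA rooms p) = stepR (lenMap rooms) p := by
  induction rooms with
  | nil => simp [stepA, placeA, stepR, firstIdx, lenMap]
  | cons r rs ih =>
    by_cases h : (r.length : Int) + 1 ≤ p
    · have hlt : ((r.length : Int) < p) := by omega
      simp [stepA, placeA, h, stepR, firstIdx, lenMap, List.findIdx_cons, hlt, List.modify]
    · have hnlt : ¬ ((r.length : Int) < p) := by omega
      have hstep : stepA (r :: rs) p = r :: stepA rs p := by
        simp only [stepA, placeA, if_neg h]
        cases placeA rs p <;> simp
      rw [hstep]
      have : lenMap (r :: stepA rs p) = (r.length : Int) :: lenMap (stepA rs p) := by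
        simp [lenMap]
      rw [this, ih]
      simp only [stepR, firstIdx, lenMap, List.map_cons, List.findIdx_cons, hnlt,
        decide_false, cond_false, List.length_cons, Nat.add_lt_add_iff_right]
      split_ifs with hi
      · simp [List.modify]
      · simp

-- binary search returns the global first index with sizes[·] < p, given that the
-- predicate is upward-closed (monotone), whenever that index lies in [lo, hi]
theorem bs_eq_firstIdx_aux (sizes : List Int) (p : Int)
    (mono : ∀ j k (hj : j < sizes.length) (hk : k < sizes.length),
      j ≤ k → sizes[j] < p → sizes[k] < p) :
    ∀ lo hi, lo ≤ firstIdx sizes p → firstIdx sizes p ≤ hi → hi ≤ sizes.length →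
      bsFirstLt sizes p lo hi = firstIdx sizes p := by
  intro lo hi
  induction hlh : hi - lo using Nat.strong_induction_on generalizing lo hi with
  | _ d ih =>
  intro h1 h2 h3
  rw [bsFirstLt]
  by_cases hlt : lo < hi
  · rw [dif_pos hlt]
    set m := (lo + hi) / 2 with hm
    have hmlt : m < hi := by omega
    have hmn : m < sizes.length := by omega
    have hget : sizes.getD m 0 = sizes[m] := by
      simp [List.getD, List.getElem?_eq_getElem hmn]
    by_cases hp : sizes[m] < p
    · -- first true index ≤ m
      have hF : firstIdx sizes p ≤ m := by
        by_contra hc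
        push_neg at hc
        have := List.not_of_lt_findIdx (p := fun x => decide (x < p)) (xs := sizes) (i := m) hc
        simp at this
        omega
      rw [if_pos (by rw [hget]; exact hp)]
      exact ih (m - lo) (by omega) lo m rfl h1 hF (by omega)
    · -- all indices ≤ m are false, so first true index > m
      have hF : m + 1 ≤ firstIdx sizes p := by
        by_contra hc
        push_neg at hc
        have hFm : firstIdx sizes p ≤ m := by omega
        have hFn : firstIdx sizes p < sizes.length := by omega
        have htrue := List.findIdx_getElem (p := fun x => decide (x < p)) (xs := sizes) (w := hFn)
        simp at htrue
        exact hp (mono _ _ hFn hmn hFm htrue)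
      rw [if_neg (by rw [hget]; exact hp)]
      exact ih (hi - (m + 1)) (by omega) (m + 1) hi rfl hF h2 h3
  · rw [dif_neg hlt]
    omega

theorem stepB_eq_stepR (sizes : List Int) (p : Int) (hni : Nonincr sizes) :
    stepB sizes p = stepR sizes p := by
  have mono : ∀ j k (hj : j < sizes.length) (hk : k < sizes.length),
      j ≤ k → sizes[j] < p → sizes[k] < p := by
    intro j k hj hk hjk hjp
    have := hni j k hj hk hjk
    omega
  have hb : bsFirstLt sizes p 0 sizes.length = firstIdx sizes p :=
    bs_eq_firstIdx_aux sizes p mono 0 sizes.length (Nat.zero_le _)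
      (List.findIdx_le_length) le_rfl
  simp only [stepB, stepR, hb]

theorem firstIdx_false {sizes : List Int} {p : Int} {j : Nat} (hj : j < sizes.length)
    (h : j < firstIdx sizes p) : ¬ sizes[j] < p := by
  have := List.not_of_lt_findIdx (p := fun x => decide (x < p)) (xs := sizes) (i := j) h
  simpa using this

theorem stepR_nonincr (sizes : List Int) (p : Int) (hni : Nonincr sizes)
    (hpos : ∀ j (hj : j < sizes.length), 1 ≤ sizes[j]) : Nonincr (stepR sizes p) := by
  unfold stepR
  by_cases hi : firstIdx sizes p < sizes.length
  · rw [if_pos hi]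
    set i := firstIdx sizes p with hidef
    have htrue : sizes[i] < p := by
      have := List.findIdx_getElem (p := fun x => decide (x < p)) (xs := sizes) (w := hi)
      simpa using this
    intro j k hj hk hjk
    rw [List.length_modify] at hj hk
    have hmono := hni j k hj hk hjk
    rw [List.getElem_modify, List.getElem_modify]
    split_ifs with h1 h2 h2
    · omega
    · -- i = k, j < i : sizes[k]+1 ≤ p ≤ sizes[j]
      subst h1
      have hji : j < firstIdx sizes p := by omega
      have hjf : ¬ sizes[j] < p := firstIdx_false hj hji
      omega
    · omega
    · omega
  · rw [if_neg hi]
    have hiall : ∀ j (hj : j < sizes.length), ¬ sizes[j] < p := by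
      intro j hj; exact firstIdx_false hj (by omega)
    intro j k hj hk hjk
    simp only [List.length_append, List.length_cons, List.length_nil] at hj hk
    by_cases hkn : k < sizes.length
    · have hjn : j < sizes.length := by omega
      rw [List.getElem_append_left hkn, List.getElem_append_left hjn]
      exact hni j k hjn hkn hjk
    · have hk1 : (sizes ++ [1])[k] = 1 := by
        rw [List.getElem_append_right (by omega)]
        simp
      rw [hk1]
      by_cases hjn : j < sizes.length
      · rw [List.getElem_append_left hjn]; exact hpos j hjn
      · have : (sizes ++ [1])[j] = 1 := by
          rw [List.getElem_append_right (by omega)]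
          simp
        rw [this]

theorem stepR_pos (sizes : List Int) (p : Int)
    (hpos : ∀ j (hj : j < sizes.length), 1 ≤ sizes[j]) :
    ∀ j (hj : j < (stepR sizes p).length), 1 ≤ (stepR sizes p)[j] := by
  unfold stepR
  by_cases hi : firstIdx sizes p < sizes.length
  · rw [if_pos hi]
    intro j hj
    rw [List.length_modify] at hj
    rw [List.getElem_modify]
    split_ifs
    · have := hpos j hj; omega
    · exact hpos j hj
  · rw [if_neg hi]
    intro j hj
    simp only [List.length_append, List.length_cons, List.length_nil] at hj
    by_cases hjn : j < sizes.length
    · rw [List.getElem_append_left hjn]; exact hpos j hjn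
    · have : (sizes ++ [1])[j]'(by simp; omega) = 1 := by
        rw [List.getElem_append_right (by omega)]
        simp
      rw [this]

theorem fold_eq (l : List Int) :
    ∀ (rooms : List (List Int)) (sizes : List Int), sizes = lenMap rooms →
      Nonincr sizes → (∀ j (hj : j < sizes.length), 1 ≤ sizes[j]) →
      (l.foldl stepA rooms).length = (l.foldl stepB sizes).length := by
  induction l with
  | nil =>
    intro rooms sizes hs _ _
    subst hs
    simp [lenMap]
  | cons p t ih =>
    intro rooms sizes hs hni hpos
    simp only [List.foldl_cons]
    have hB : stepB sizes p = stepR sizes p := stepB_eq_stepR sizes p hni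
    have hmap : stepB sizes p = lenMap (stepA rooms p) := by
      rw [hB, stepA_map, hs]
    rw [hB] at hmap ⊢
    exact ih (stepA rooms p) (stepR sizes p) (by rw [hmap])
      (hs ▸ stepR_nonincr sizes p hni hpos) (stepR_pos sizes p hpos)

-- ===== VERDICT (by name: the statement is the Claim_ definition above) =====
theorem solution_spec : Claim_equal_solution := by
  intro A _
  unfold Spec_solution solution solution_alt
  have := fold_eq (PySem.List.sorted A (fun x => x) false) [] [] (by simp [lenMap])
    (by intro j k hj hk; simp at hj) (by intro j hj; simp at hj)
  rw [this]
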